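-- pv_equiv track=rewrite | github.com/huchaoyuan/ichw | pyassign2/currency.py | up
-- ===== SOURCE A (Python) =====
-- def up(a):
--     '''Selective uppercase strings and converted into a dictionary.
--     a is the string to be selectively capitalized;
--     return is a string that is selectively capitalized
--     '''
--     b = ''
--     for i in range(len(a)):
--         if str(a[i:i+4])=='true'or str(a[i:i+5])=='false':
--             b=b+a[i].upper()
--         else:
--             b=b+a[i]
--     return b
--     pass
-- ===== SOURCE B (Python) =====
-- def up(a):
--     '''Selective uppercase strings and converted into a dictionary.
--     a is the string to be selectively capitalized;
--     return is a string that is selectively capitalized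
--     '''
--     out = []
--     i = 0
--     n = len(a)
--     while i < n:
--         if a.startswith('true', i):
--             out.append('True')
--             i += 4
--         elif a.startswith('false', i):
--             out.append('False')
--             i += 5
--         else:
--             out.append(a[i])
--             i += 1
--     return ''.join(out)
-- ===== Notes on version B (the rewrite author's own statement) =====
-- stated objective: alternative
-- what changed: A compares two fresh slices at every single index and grows the result one character at a time by string concatenation; B advances an index with startswith, emits each matched keyword ('True'/'False') as a whole piece (skipping past it), and joins the collected pieces once at the end.
import Mathlib
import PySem

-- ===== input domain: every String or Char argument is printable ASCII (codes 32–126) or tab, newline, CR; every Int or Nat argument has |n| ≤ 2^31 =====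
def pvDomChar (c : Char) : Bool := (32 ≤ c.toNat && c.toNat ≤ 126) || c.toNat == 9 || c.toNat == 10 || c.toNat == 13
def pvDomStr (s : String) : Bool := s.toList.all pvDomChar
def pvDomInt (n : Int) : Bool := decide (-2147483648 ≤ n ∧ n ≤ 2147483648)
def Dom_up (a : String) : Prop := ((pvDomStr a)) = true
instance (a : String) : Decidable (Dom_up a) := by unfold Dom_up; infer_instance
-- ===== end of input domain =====

-- B replaces A's per-index slice comparisons and '+'-accumulator with an index-advancing loop
-- (startswith, emit each matched keyword wholesale, join the pieces) — objective: alternative decomposition.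

-- ===== PORT A =====
-- A: b = ''; for i in range(len(a)): if a[i:i+4]=='true' or a[i:i+5]=='false': b += a[i].upper() else: b += a[i]
def up (a : String) : String :=
  String.ofList ((PySem.List.pyRange 0 (PySem.Chars.len a.toList) 1).foldl
    (fun b i =>
      if PySem.Chars.slice a.toList (some i) (some (i + 4)) = ['t','r','u','e'] ∨
         PySem.Chars.slice a.toList (some i) (some (i + 5)) = ['f','a','l','s','e'] then
        b ++ [PySem.Chars.upperChar (PySem.List.pyGetD a.toList i ' ')]
      else
        b ++ [PySem.List.pyGetD a.toList i ' ']) [])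

-- ===== PORT B =====
-- B's while loop: out/i as accumulator/index. a.startswith(p, i) is ported as
-- PySem.Chars.startswith (l.drop i) p (exact for 0 ≤ i, which holds: i counts up from 0);
-- a[i] with 0 ≤ i < n is ported as l.getD i ' ' (exact: in range).
def upAltGo (l : List Char) (n i : Nat) : List Char :=
  if i < n then
    if PySem.Chars.startswith (l.drop i) ['t','r','u','e'] then
      ['T','r','u','e'] ++ upAltGo l n (i + 4)
    else if PySem.Chars.startswith (l.drop i) ['f','a','l','s','e'] then
      ['F','a','l','s','e'] ++ upAltGo l n (i + 5)
    else
      l.getD i ' ' :: upAltGo l n (i + 1)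
  else []
  termination_by n - i
  decreasing_by all_goals omega

def up_alt (a : String) : String :=
  String.ofList (upAltGo a.toList a.toList.length 0)

-- ===== PRECONDITION & SPEC =====
def Spec_up (a : String) (out : String) : Prop := out = up_alt a
instance (a : String) (out : String) : Decidable (Spec_up a out) := by unfold Spec_up; infer_instance

-- ===== CLAIM (what is proved, stated in full; the proofs are below) =====
def Claim_equal_up : Prop := ∀ (a : String), Dom_up a → Spec_up a (up a)

-- ===== LEMMAS AND PROOFS =====

-- canonical per-position description of the result: each character is uppercased iff a keyword starts there
def upScan : List Char → List Char
  | [] => []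
  | c :: r =>
    (if (c :: r).take 4 = ['t','r','u','e'] ∨ (c :: r).take 5 = ['f','a','l','s','e'] then
      PySem.Chars.upperChar c
     else c) :: upScan r

lemma upScan_cons_of_ne {c : Char} (r : List Char) (ht : c ≠ 't') (hf : c ≠ 'f') :
    upScan (c :: r) = c :: upScan r := by
  simp only [upScan, List.take_succ_cons]
  rw [if_neg]
  rintro (h | h) <;> simp_all

-- B computes upScan: after an emitted keyword, its inner letters start no keyword
lemma upAltGo_eq_upScan (l : List Char) (n i : Nat) (hn : n = l.length) :
    upAltGo l n i = upScan (l.drop i) := by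
  subst hn
  fun_induction upAltGo l l.length i with
  | case1 i h htrue ih =>
    rw [PySem.Chars.startswith_iff] at htrue
    obtain ⟨t, ht⟩ := htrue
    have h4 : t = l.drop (i + 4) := by
      have := congrArg (List.drop 4) ht
      simpa [List.drop_drop, Nat.add_comm] using this
    rw [ih, ← h4, ← ht]
    simp only [List.cons_append, List.nil_append]
    conv_rhs => rw [upScan]
    rw [if_pos (by simp), upScan_cons_of_ne _ (by decide) (by decide),
        upScan_cons_of_ne _ (by decide) (by decide),
        upScan_cons_of_ne _ (by decide) (by decide)]
    simp [PySem.Chars.upperChar]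
    decide
  | case2 i h h1 hfalse ih =>
    rw [PySem.Chars.startswith_iff] at hfalse
    obtain ⟨t, ht⟩ := hfalse
    have h5 : t = l.drop (i + 5) := by
      have := congrArg (List.drop 5) ht
      simpa [List.drop_drop, Nat.add_comm] using this
    rw [ih, ← h5, ← ht]
    simp only [List.cons_append, List.nil_append]
    conv_rhs => rw [upScan]
    rw [if_pos (by simp), upScan_cons_of_ne _ (by decide) (by decide),
        upScan_cons_of_ne _ (by decide) (by decide),
        upScan_cons_of_ne _ (by decide) (by decide),
        upScan_cons_of_ne _ (by decide) (by decide)]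
    simp [PySem.Chars.upperChar]
    decide
  | case3 i h h1 h2 ih =>
    rw [PySem.Chars.startswith_iff] at h1 h2
    obtain ⟨c, t, hct⟩ : ∃ c t, l.drop i = c :: t := by
      cases hd : l.drop i with
      | nil => exfalso; have := List.drop_eq_nil_iff.mp hd; omega
      | cons c t => exact ⟨c, t, rfl⟩
    have h1' : l.drop (i + 1) = t := by
      have := congrArg (List.drop 1) hct
      simpa [List.drop_drop, Nat.add_comm] using this
    have hc : l.getD i ' ' = c := by
      have : (l.drop i).headD ' ' = c := by rw [hct]; rfl
      simpa [List.headD_eq_head?_getD, List.head?_drop, List.getD_eq_getElem?_getD] using this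
    rw [ih, h1', hct, hc]
    conv_rhs => rw [upScan]
    rw [if_neg]
    rw [hct] at h1 h2
    rintro (hh | hh)
    · exact h1 (List.prefix_iff_eq_take.mpr hh.symm)
    · exact h2 (List.prefix_iff_eq_take.mpr hh.symm)
  | case4 i h =>
    rw [List.drop_eq_nil_iff.mpr (by omega)]
    rfl

-- what A's loop body writes at position k, as a function of the suffix l.drop k
def upCell (d : List Char) : Char :=
  if d.take 4 = ['t','r','u','e'] ∨ d.take 5 = ['f','a','l','s','e'] then
    PySem.Chars.upperChar (d.headD ' ')
  else d.headD ' '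

lemma upCell_nat (l : List Char) (k : Nat) :
    (if PySem.Chars.slice l (some (k:Int)) (some ((k:Int) + 4)) = ['t','r','u','e'] ∨
        PySem.Chars.slice l (some (k:Int)) (some ((k:Int) + 5)) = ['f','a','l','s','e'] then
      PySem.Chars.upperChar (PySem.List.pyGetD l (k:Int) ' ')
     else PySem.List.pyGetD l (k:Int) ' ') = upCell (l.drop k) := by
  have h4 : ((k:Int) + 4) = ((k + 4 : Nat) : Int) := by push_cast; ring
  have h5 : ((k:Int) + 5) = ((k + 5 : Nat) : Int) := by push_cast; ring
  have hg : PySem.List.pyGetD l (k:Int) ' ' = (l.drop k).headD ' ' := by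
    simp [PySem.List.pyGetD_natCast, List.headD_eq_head?_getD, List.head?_drop,
      List.getD_eq_getElem?_getD]
  rw [h4, h5]
  simp only [PySem.Chars.slice_eq_listSlice, PySem.List.slice_natCast, hg]
  have : k + 4 - k = 4 := by omega
  rw [this]
  have : k + 5 - k = 5 := by omega
  rw [this]
  rfl

lemma range_map_upCell (l : List Char) :
    (List.range l.length).map (fun k => upCell (l.drop k)) = upScan l := by
  induction l with
  | nil => simp [upScan]
  | cons c r ih =>
    rw [List.length_cons, List.range_succ_eq_map]
    simp only [List.map_cons, List.map_map, List.drop_zero]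
    rw [upScan, ← ih]
    congr 1

-- A computes upScan
lemma up_eq_upScan (a : String) : up a = String.ofList (upScan a.toList) := by
  unfold up
  congr 1
  have hfun : (fun (b : List Char) (i : Int) =>
      if PySem.Chars.slice a.toList (some i) (some (i + 4)) = ['t','r','u','e'] ∨
         PySem.Chars.slice a.toList (some i) (some (i + 5)) = ['f','a','l','s','e'] then
        b ++ [PySem.Chars.upperChar (PySem.List.pyGetD a.toList i ' ')]
      else
        b ++ [PySem.List.pyGetD a.toList i ' ']) =
      (fun b i => b ++ [if PySem.Chars.slice a.toList (some i) (some (i + 4)) = ['t','r','u','e'] ∨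
         PySem.Chars.slice a.toList (some i) (some (i + 5)) = ['f','a','l','s','e'] then
        PySem.Chars.upperChar (PySem.List.pyGetD a.toList i ' ')
      else PySem.List.pyGetD a.toList i ' ']) := by
    funext b i; split_ifs <;> rfl
  rw [hfun, PySem.List.foldl_append_singleton_eq_map]
  rw [show PySem.Chars.len a.toList = (a.toList.length : Int) from by simp,
      PySem.List.pyRange_zero_natCast, List.map_map, ← range_map_upCell]
  apply List.map_congr_left
  intro k _
  simp only [Function.comp]
  exact upCell_nat a.toList k

-- ===== VERDICT (by name: the statement is the Claim_ definition above) =====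
theorem up_spec : Claim_equal_up := by
  intro a _
  unfold Spec_up up_alt
  rw [up_eq_upScan, upAltGo_eq_upScan _ _ _ rfl, List.drop_zero]
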